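-- pv_equiv track=rewrite | github.com/MobSF/Mobile-Security-Framework-MobSF | mobsf/StaticAnalyzer/views/android/sbom_analysis.py | merge_common_packages
-- ===== SOURCE A (Python) =====
-- def merge_common_packages(items):
--     """Merge common packages."""
--     items = list(items)
--     items.sort()  # Sort items lexicographically
--     merged = []
--     for item in items:
--         if not merged or not item.startswith(merged[-1] + '.'):
--             merged.append(item)
--     return merged
-- ===== SOURCE B (Python) =====
-- def merge_common_packages(items):
--     """Merge common packages."""
--     s = sorted(items)
--     present = set(s)
--     return [x for x in s
--             if not any(c == '.' and x[:m] in present for m, c in enumerate(x))]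
-- ===== Notes on version B (the rewrite author's own statement) =====
-- stated objective: alternative
-- what changed: Replaces A's compare-to-last-kept adjacency scan with a set of all items plus an ancestor lookup: each item of the sorted list is kept iff none of its proper dot-boundary prefixes occurs in the set, so no accumulator is ever consulted.
-- intended difference: On lists where some item has a proper dot-boundary prefix among the items but every such ancestor p is separated from the item by an intervening item not extending p+'.' (e.g. ['a','a!b','a.b']), A keeps the sub-package (its last-kept pointer was diverted), while B removes it; B's value is intended since the function's purpose is to drop sub-packages of kept packages. — e.g. on merge_common_packages(["a", "a!b", "a.b"]): A returns ["a", "a!b", "a.b"], B returns ["a", "a!b"]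
import Mathlib
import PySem

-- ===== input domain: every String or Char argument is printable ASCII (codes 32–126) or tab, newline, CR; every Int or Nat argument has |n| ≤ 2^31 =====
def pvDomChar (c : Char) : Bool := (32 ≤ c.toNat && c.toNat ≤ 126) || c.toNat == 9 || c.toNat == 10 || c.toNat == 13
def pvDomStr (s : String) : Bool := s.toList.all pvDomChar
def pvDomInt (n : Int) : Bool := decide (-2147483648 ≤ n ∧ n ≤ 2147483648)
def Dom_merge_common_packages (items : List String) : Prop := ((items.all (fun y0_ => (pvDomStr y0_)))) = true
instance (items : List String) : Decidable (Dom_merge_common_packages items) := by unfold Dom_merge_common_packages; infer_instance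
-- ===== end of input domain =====

-- B replaces A's compare-to-last-kept scan by a set of all items plus an ancestor-prefix lookup
-- (objective: alternative); on the D_ inputs below A's adjacency trick keeps a sub-package and
-- B's value is the intended one.

-- ===== PORT A =====
def merge_common_packages (items : List String) : List String :=
  (PySem.List.sorted items (fun x => x) false).foldl
    (fun merged item =>
      if merged = [] ∨
         ¬ (PySem.Str.startswith item (((PySem.List.pyGet? merged (-1)).getD "") ++ ".") = true) then
        merged ++ [item]
      else merged) []

-- ===== PORT B =====
-- Source B: s = sorted(items); present = set(s);
-- [x for x in s if not any(c == '.' and x[:m] in present for m, c in enumerate(x))]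
def merge_common_packages_alt (items : List String) : List String :=
  let s := PySem.List.sorted items (fun x => x) false
  let present := PySem.Set.ofList s
  s.filter (fun x =>
    !((PySem.List.enumerate x.toList).any (fun mc =>
        mc.2 == '.' && PySem.Set.contains present (PySem.Str.slice x none (some mc.1)))))

-- ===== PRECONDITION & SPEC =====
-- On lists where some item has a proper dot-boundary prefix among the items but every such
-- ancestor p is separated from the item by an intervening item not extending p+'.'
-- (e.g. ["a","a!b","a.b"]), A keeps the sub-package (its last-kept pointer was diverted),
-- while B removes it; B's value is the intended one, since the function's purpose is to drop
-- sub-packages of kept packages.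
def D_merge_common_packages (items : List String) : Prop :=
  ∃ x ∈ items, (∃ p ∈ items, PySem.Str.startswith x (p ++ ".") = true) ∧
    ¬ ∃ p ∈ items, PySem.Str.startswith x (p ++ ".") = true ∧
        ∀ y ∈ items, p.toList < y.toList → y.toList < x.toList →
          PySem.Str.startswith y (p ++ ".") = true
instance (items : List String) : Decidable (D_merge_common_packages items) := by
  unfold D_merge_common_packages; infer_instance

def Spec_merge_common_packages (items : List String) (out : List String) : Prop :=
  ¬ D_merge_common_packages items → out = merge_common_packages_alt items
instance (items : List String) (out : List String) : Decidable (Spec_merge_common_packages items out) := by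
  unfold Spec_merge_common_packages; infer_instance

def pvDiffWitness_merge_common_packages : List String := ["a", "a!b", "a.b"]
def pvDiffWitnessOut_merge_common_packages : (List String) × (List String) :=
  (["a", "a!b", "a.b"], ["a", "a!b"])

-- ===== CLAIM (what is proved, stated in full; the proofs are below) =====
def Claim_unchanged_merge_common_packages : Prop := ∀ (items : List String), Dom_merge_common_packages items → Spec_merge_common_packages items (merge_common_packages items)
def Claim_changed_merge_common_packages : Prop := Dom_merge_common_packages (pvDiffWitness_merge_common_packages) ∧ D_merge_common_packages (pvDiffWitness_merge_common_packages) ∧ merge_common_packages (pvDiffWitness_merge_common_packages) = pvDiffWitnessOut_merge_common_packages.1 ∧ merge_common_packages_alt (pvDiffWitness_merge_common_packages) = pvDiffWitnessOut_merge_common_packages.2 ∧ pvDiffWitnessOut_merge_common_packages.1 ≠ pvDiffWitnessOut_merge_common_packages.2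
def Claim_exact_merge_common_packages : Prop := ∀ (items : List String), Dom_merge_common_packages items → D_merge_common_packages items → merge_common_packages items ≠ merge_common_packages_alt items

-- ===== LEMMAS AND PROOFS =====

-- "p is a dot-boundary ancestor of x", as a plain Prop on char lists
def pvSW (x p : String) : Prop := p.toList ++ ['.'] <+: x.toList

theorem pvSW_iff (x p : String) : PySem.Str.startswith x (p ++ ".") = true ↔ pvSW x p := by
  simp [pvSW, PySem.Chars.startswith_iff]

theorem pv_prefix_lt (l : List Char) (c : Char) (t : List Char) : l < l ++ c :: t := by
  induction l with
  | nil => exact List.Lex.nil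
  | cons a l ih => exact List.Lex.cons ih

theorem pvSW_lt {x p : String} (h : pvSW x p) : p < x := by
  rw [String.lt_iff_toList_lt]
  obtain ⟨t, ht⟩ := h
  rw [← ht]
  simpa using pv_prefix_lt p.toList '.' t

theorem pvSW_trans {y x h : String} (h1 : pvSW x h) (h2 : pvSW y x) : pvSW y h :=
  (h1.trans (List.prefix_append x.toList ['.'])).trans h2

-- A's drop test against the remembered prefix, written as a scan of the earlier items:
-- x is "covered" by pre iff some p in pre has x ⊒ p+'.' and every later item of pre ⊒ p+'.'
def pvCov : List String → String → Bool
  | [], _ => false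
  | p :: rest, x =>
      (PySem.Str.startswith x (p ++ ".") && rest.all (fun q => PySem.Str.startswith q (p ++ "."))) ||
        pvCov rest x

theorem pvCov_iff (pre : List String) (x : String) :
    pvCov pre x = true ↔ ∃ a p b, pre = a ++ p :: b ∧ pvSW x p ∧ ∀ q ∈ b, pvSW q p := by
  induction pre with
  | nil => simp [pvCov]
  | cons p rest ih =>
    simp only [pvCov, Bool.or_eq_true, Bool.and_eq_true, List.all_eq_true, ih, pvSW_iff]
    constructor
    · rintro (⟨h1, h2⟩ | ⟨a, q, b, rfl, hq1, hq2⟩)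
      · exact ⟨[], p, rest, rfl, h1, h2⟩
      · exact ⟨p :: a, q, b, rfl, hq1, hq2⟩
    · rintro ⟨a, q, b, heq, hq1, hq2⟩
      cases a with
      | nil =>
        simp only [List.nil_append, List.cons.injEq] at heq
        obtain ⟨rfl, rfl⟩ := heq
        exact Or.inl ⟨hq1, hq2⟩
      | cons a0 a1 =>
        simp only [List.cons_append, List.cons.injEq] at heq
        obtain ⟨rfl, rfl⟩ := heq
        exact Or.inr ⟨a1, q, b, rfl, hq1, hq2⟩

-- reference form of A: structural filter accumulating the list of earlier items
def pvAref : List String → List String → List String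
  | _, [] => []
  | pre, x :: t =>
      if pvCov pre x then pvAref (pre ++ [x]) t else x :: pvAref (pre ++ [x]) t

-- A's loop with the last kept item h and remaining input l, expressed as the suffix it appends
def pvStateA (h : String) : List String → List String
  | [] => []
  | x :: t =>
      if PySem.Str.startswith x (h ++ ".") then pvStateA h t
      else x :: pvStateA x t

-- A's fold, once the accumulator is nonempty with last element h, appends exactly pvStateA h l
theorem pvFoldA_eq (l : List String) : ∀ (pre : List String) (h : String),
    l.foldl
      (fun merged item =>
        if merged = [] ∨
           ¬ (PySem.Str.startswith item (((PySem.List.pyGet? merged (-1)).getD "") ++ ".") = true) then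
          merged ++ [item]
        else merged) (pre ++ [h]) = pre ++ [h] ++ pvStateA h l := by
  induction l with
  | nil => intro pre h; simp [pvStateA]
  | cons x t ih =>
    intro pre h
    rw [List.foldl_cons, PySem.List.pyGet?_neg_one_append_singleton]
    by_cases hs : PySem.Str.startswith x (h ++ ".") = true
    · rw [if_neg (by simp [hs, -PySem.Str.startswith_eq])]
      rw [ih]
      simp [pvStateA, hs, -PySem.Str.startswith_eq]
    · rw [if_pos (Or.inr (by simpa [-PySem.Str.startswith_eq] using hs))]
      rw [show pre ++ [h] ++ [x] = (pre ++ [h]) ++ [x] from rfl, ih]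
      simp [pvStateA, hs, -PySem.Str.startswith_eq]

-- loop invariant: h sits in pre followed only by h+'.'-extensions, and being covered by pre
-- is exactly "extends h+'.'"
def pvGood (pre : List String) (h : String) : Prop :=
  (∃ a b, pre = a ++ h :: b ∧ ∀ q ∈ b, pvSW q h) ∧ (∀ y, pvCov pre y = true ↔ pvSW y h)

theorem pvGood_drop {pre : List String} {h x : String} (hg : pvGood pre h) (hx : pvSW x h) :
    pvGood (pre ++ [x]) h := by
  obtain ⟨⟨a, b, rfl, hb⟩, hcov⟩ := hg
  refine ⟨⟨a, b ++ [x], by simp, ?_⟩, ?_⟩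
  · intro q hq
    rcases List.mem_append.mp hq with hq | hq
    · exact hb q hq
    · simp only [List.mem_singleton] at hq; subst hq; exact hx
  · intro y
    constructor
    · intro hc
      obtain ⟨a', p, b', heq, hy, hb'⟩ := (pvCov_iff _ y).mp hc
      rcases List.eq_nil_or_concat b' with rfl | ⟨b'', x', rfl⟩
      · have heq' : (a ++ h :: b) ++ [x] = a' ++ [p] := by simpa using heq
        obtain ⟨h1, rfl⟩ := List.append_singleton_inj.mp heq'
        exact pvSW_trans hx hy
      · have heq2 : (a ++ h :: b) ++ [x] = (a' ++ p :: b'') ++ [x'] := by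
          simpa using heq
        obtain ⟨hpre, hxx⟩ := List.append_singleton_inj.mp heq2
        subst hxx
        have : pvCov (a ++ h :: b) y = true :=
          (pvCov_iff _ y).mpr ⟨a', p, b'', hpre, hy, fun q hq => hb' q (by simp [hq])⟩
        exact (hcov y).mp this
    · intro hy
      exact (pvCov_iff _ y).mpr ⟨a, h, b ++ [x], by simp, hy, by
        intro q hq
        rcases List.mem_append.mp hq with hq | hq
        · exact hb q hq
        · simp only [List.mem_singleton] at hq; subst hq; exact hx⟩

theorem pvGood_keep {pre : List String} {h x : String} (hg : pvGood pre h) (hx : ¬ pvSW x h) :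
    pvGood (pre ++ [x]) x := by
  obtain ⟨_, hcov⟩ := hg
  refine ⟨⟨pre, [], by simp, by simp⟩, ?_⟩
  intro y
  constructor
  · intro hc
    obtain ⟨a', p, b', heq, hy, hb'⟩ := (pvCov_iff _ y).mp hc
    rcases List.eq_nil_or_concat b' with rfl | ⟨b'', x', rfl⟩
    · have heq' : pre ++ [x] = a' ++ [p] := by simpa using heq
      obtain ⟨h1, hxp⟩ := List.append_singleton_inj.mp heq'
      subst hxp
      exact hy
    · have heq2 : pre ++ [x] = (a' ++ p :: b'') ++ [x'] := by simpa using heq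
      obtain ⟨hpre, hxx⟩ := List.append_singleton_inj.mp heq2
      subst hxx
      have hxp : pvSW x p := hb' x (by simp)
      have : pvCov pre x = true :=
        (pvCov_iff _ x).mpr ⟨a', p, b'', hpre, hxp, fun q hq => hb' q (by simp [hq])⟩
      exact absurd ((hcov x).mp this) hx
  · intro hy
    exact (pvCov_iff _ y).mpr ⟨pre, x, [], by simp, hy, by simp⟩

theorem pvStateA_eq_Aref (rem : List String) : ∀ (pre : List String) (h : String),
    pvGood pre h → pvStateA h rem = pvAref pre rem := by
  induction rem with
  | nil => intro pre h _; simp [pvStateA, pvAref]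
  | cons x t ih =>
    intro pre h hg
    by_cases hx : pvSW x h
    · have hc : pvCov pre x = true := (hg.2 x).mpr hx
      have hs : PySem.Str.startswith x (h ++ ".") = true := (pvSW_iff x h).mpr hx
      simp only [pvStateA, pvAref, hs, hc, if_pos]
      exact ih (pre ++ [x]) h (pvGood_drop hg hx)
    · have hc : pvCov pre x = false := by
        rw [Bool.eq_false_iff]; intro hcc; exact hx ((hg.2 x).mp hcc)
      have hs : ¬ PySem.Str.startswith x (h ++ ".") = true := fun hss => hx ((pvSW_iff x h).mp hss)
      simp only [pvStateA, pvAref, hc, if_neg hs, Bool.false_eq_true, if_false]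
      exact congrArg (x :: ·) (ih (pre ++ [x]) x (pvGood_keep hg hx))

theorem pvA_eq_Aref (items : List String) :
    merge_common_packages items = pvAref [] (PySem.List.sorted items (fun x => x) false) := by
  unfold merge_common_packages
  cases hs : PySem.List.sorted items (fun x => x) false with
  | nil => simp [pvAref]
  | cons h t =>
    rw [List.foldl_cons, if_pos (Or.inl rfl),
      show ([] : List String) ++ [h] = ([] : List String) ++ [h] from rfl, pvFoldA_eq]
    have hgood : pvGood [h] h := by
      refine ⟨⟨[], [], rfl, by simp⟩, ?_⟩
      intro y
      simp [pvCov, pvSW, PySem.Chars.startswith_iff]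
    rw [pvStateA_eq_Aref t [h] h hgood]
    simp [pvAref, pvCov]

theorem pvSlice_toList (x : String) (k : Nat) :
    (PySem.Str.slice x none (some (k : Int))).toList = x.toList.take k := by
  simp [PySem.Str.slice, PySem.List.slice_to_natCast]

-- B's per-item test is exactly "some item of s is a dot-boundary ancestor"
theorem pvAnyAnc_iff (s : List String) (x : String) :
    ((PySem.List.enumerate x.toList).any (fun mc =>
        mc.2 == '.' && PySem.Set.contains (PySem.Set.ofList s) (PySem.Str.slice x none (some mc.1)))) = true
      ↔ ∃ p ∈ s, pvSW x p := by
  rw [List.any_eq_true]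
  constructor
  · rintro ⟨mc, hmem, hcond⟩
    obtain ⟨k, hk, rfl⟩ := (PySem.List.mem_enumerate_iff _ _ _).mp hmem
    simp only [Bool.and_eq_true, beq_iff_eq] at hcond
    obtain ⟨hdot, hcont⟩ := hcond
    have hzk : ((0 : Int) + (k : Int)) = (k : Int) := by ring
    rw [hzk] at hcont
    have hcmem : PySem.Str.slice x none (some (k : Int)) ∈ s := by
      simpa [pysem] using hcont
    refine ⟨_, hcmem, ?_⟩
    unfold pvSW
    rw [pvSlice_toList]
    have htake : x.toList.take k ++ ['.'] = x.toList.take (k + 1) := by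
      rw [List.take_add_one, List.getElem?_eq_getElem hk, hdot]
      rfl
    rw [htake]
    exact List.take_prefix _ _
  · rintro ⟨p, hps, hsw⟩
    obtain ⟨t, ht⟩ := hsw
    set k := p.toList.length with hkdef
    have hk : k < x.toList.length := by
      rw [← ht]; simp [hkdef]
    have ht' : p.toList ++ '.' :: t = x.toList := by simpa using ht
    have hdot : x.toList[k] = '.' := by
      have := List.getElem_of_eq ht'.symm hk
      rw [this, List.getElem_append_right (by simp [hkdef])]
      simp [hkdef]
    refine ⟨((0 : Int) + (k : Int), x.toList[k]), (PySem.List.mem_enumerate_iff _ _ _).mpr ⟨k, hk, rfl⟩, ?_⟩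
    simp only [Bool.and_eq_true, beq_iff_eq]
    have hzk : ((0 : Int) + (k : Int)) = (k : Int) := by ring
    refine ⟨hdot, ?_⟩
    rw [hzk]
    have hpe : PySem.Str.slice x none (some (k : Int)) = p := by
      apply String.toList_inj.mp
      rw [pvSlice_toList, ← ht']
      simp [hkdef]
    rw [hpe]
    simpa [pysem] using hps

-- the B-side predicate, named for the remaining proofs
def pvPredB (s : List String) (x : String) : Bool :=
  (PySem.List.enumerate x.toList).any (fun mc =>
    mc.2 == '.' && PySem.Set.contains (PySem.Set.ofList s) (PySem.Str.slice x none (some mc.1)))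

-- B's port with its lets spelled out
theorem pvB_eq_filter (items : List String) :
    merge_common_packages_alt items =
      (PySem.List.sorted items (fun x => x) false).filter (fun x =>
        !(pvPredB (PySem.List.sorted items (fun x => x) false) x)) := rfl

-- last-occurrence decomposition
theorem pv_exists_last_split {p : String} {l : List String} (h : p ∈ l) :
    ∃ a b, l = a ++ p :: b ∧ p ∉ b := by
  induction l with
  | nil => cases h
  | cons z t ih =>
    by_cases hpt : p ∈ t
    · obtain ⟨a, b, rfl, hnb⟩ := ih hpt
      exact ⟨z :: a, b, rfl, hnb⟩
    · rcases List.mem_cons.mp h with rfl | hpt2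
      · exact ⟨[], t, rfl, hpt⟩
      · exact absurd hpt2 hpt

-- a covered item has a value-level clean ancestor (uses sortedness of pre ++ x :: suf)
theorem pvCov_clean {items pre suf : List String} {x : String}
    (hs : PySem.List.sorted items (fun x => x) false = pre ++ x :: suf)
    (hc : pvCov pre x = true) :
    ∃ p ∈ items, pvSW x p ∧ ∀ y ∈ items, p.toList < y.toList → y.toList < x.toList → pvSW y p := by
  obtain ⟨a, p, b, hpre, hswx, hb⟩ := (pvCov_iff pre x).mp hc
  have hperm : (pre ++ x :: suf).Perm items := by
    rw [← hs]; exact PySem.List.sorted_perm items (fun x => x) false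
  have hpair : (pre ++ x :: suf).Pairwise (fun a b => a ≤ b) := by
    rw [← hs]; exact PySem.List.sorted_pairwise items (fun x => x)
  have hmem : ∀ z, z ∈ items ↔ z ∈ pre ++ x :: suf := fun z => (hperm.mem_iff).symm
  refine ⟨p, (hmem p).mpr (by simp [hpre]), hswx, ?_⟩
  intro y hy hlt1 hlt2
  have hpy : p < y := String.lt_iff_toList_lt.mpr hlt1
  have hyx : y < x := String.lt_iff_toList_lt.mpr hlt2
  have hys : y ∈ pre ++ x :: suf := (hmem y).mp hy
  rcases List.mem_append.mp hys with hyp | hyt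
  · rw [hpre] at hyp
    rcases List.mem_append.mp hyp with hya | hypb
    · have hpairpre : pre.Pairwise (fun a b => a ≤ b) := (List.pairwise_append.mp hpair).1
      rw [hpre] at hpairpre
      have : y ≤ p := (List.pairwise_append.mp hpairpre).2.2 y hya p (by simp)
      exact absurd hpy (not_lt.mpr this)
    · rcases List.mem_cons.mp hypb with rfl | hyb
      · exact absurd hpy (lt_irrefl _)
      · exact hb y hyb
  · rcases List.mem_cons.mp hyt with rfl | hysuf
    · exact absurd hyx (lt_irrefl _)
    · have : x ≤ y := (List.pairwise_cons.mp (List.pairwise_append.mp hpair).2.1).1 y hysuf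
      exact absurd hyx (not_lt.mpr this)

-- converse under ¬D_: any value-level ancestor forces coverage
theorem pv_point {items pre suf : List String} {x : String}
    (hs : PySem.List.sorted items (fun x => x) false = pre ++ x :: suf)
    (hnd : ¬ D_merge_common_packages items) :
    pvCov pre x = true ↔ ∃ p ∈ (pre ++ x :: suf), pvSW x p := by
  have hperm : (pre ++ x :: suf).Perm items := by
    rw [← hs]; exact PySem.List.sorted_perm items (fun x => x) false
  have hpair : (pre ++ x :: suf).Pairwise (fun a b => a ≤ b) := by
    rw [← hs]; exact PySem.List.sorted_pairwise items (fun x => x)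
  have hmem : ∀ z, z ∈ items ↔ z ∈ pre ++ x :: suf := fun z => (hperm.mem_iff).symm
  constructor
  · intro hc
    obtain ⟨a, p, b, hpre, hswx, _⟩ := (pvCov_iff pre x).mp hc
    exact ⟨p, by simp [hpre], hswx⟩
  · rintro ⟨p0, hp0, hsw0⟩
    unfold D_merge_common_packages at hnd
    push Not at hnd
    have hxi : x ∈ items := (hmem x).mpr (by simp)
    obtain ⟨p, hpi, hswp, hclean⟩ := hnd x hxi ⟨p0, (hmem p0).mpr hp0, (pvSW_iff x p0).mpr hsw0⟩
    have hswp' : pvSW x p := (pvSW_iff x p).mp hswp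
    have hpx : p < x := pvSW_lt hswp'
    have hppos : p ∈ pre := by
      rcases List.mem_append.mp ((hmem p).mp hpi) with h1 | h1
      · exact h1
      · rcases List.mem_cons.mp h1 with rfl | h2
        · exact absurd hpx (lt_irrefl _)
        · have : x ≤ p := (List.pairwise_cons.mp (List.pairwise_append.mp hpair).2.1).1 p h2
          exact absurd hpx (not_lt.mpr this)
    obtain ⟨a, b, hpre, hnb⟩ := pv_exists_last_split hppos
    refine (pvCov_iff pre x).mpr ⟨a, p, b, hpre, hswp', ?_⟩
    intro q hq
    have hqpre : q ∈ pre := by rw [hpre]; simp [hq]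
    have hqi : q ∈ items := (hmem q).mpr (List.mem_append.mpr (Or.inl hqpre))
    have hpairpre : pre.Pairwise (fun a b => a ≤ b) := (List.pairwise_append.mp hpair).1
    have hpq : p ≤ q := by
      rw [hpre] at hpairpre
      exact (List.pairwise_cons.mp (List.pairwise_append.mp hpairpre).2.1).1 q hq
    have hqx : q ≤ x := (List.pairwise_append.mp hpair).2.2 q hqpre x (by simp)
    have hqnp : q ≠ p := fun hqp => hnb (hqp ▸ hq)
    rcases lt_or_eq_of_le hqx with hqlt | rfl
    · exact (pvSW_iff q p).mp
        (hclean q hqi (String.lt_iff_toList_lt.mp (lt_of_le_of_ne hpq (Ne.symm hqnp)))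
          (String.lt_iff_toList_lt.mp hqlt))
    · exact hswp'

theorem pvAref_eq_filter {items : List String} (hnd : ¬ D_merge_common_packages items) :
    ∀ (rem pre : List String),
      PySem.List.sorted items (fun x => x) false = pre ++ rem →
      pvAref pre rem = rem.filter (fun y =>
        !(pvPredB (PySem.List.sorted items (fun x => x) false) y)) := by
  intro rem
  induction rem with
  | nil => intro pre _; simp [pvAref]
  | cons x t ih =>
    intro pre hs
    have hbridge : pvCov pre x = pvPredB (PySem.List.sorted items (fun x => x) false) x := by
      rw [Bool.eq_iff_iff]
      rw [pv_point hs hnd]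
      unfold pvPredB
      rw [pvAnyAnc_iff, hs]
    have ht : PySem.List.sorted items (fun x => x) false = (pre ++ [x]) ++ t := by
      rw [hs]; simp
    cases hcov : pvCov pre x with
    | true =>
      have hp : pvPredB (PySem.List.sorted items (fun x => x) false) x = true := by
        rw [← hbridge]; exact hcov
      simp only [pvAref, hcov, if_pos, List.filter_cons, hp, Bool.not_true, Bool.false_eq_true,
        if_false]
      exact ih (pre ++ [x]) ht
    | false =>
      have hp : pvPredB (PySem.List.sorted items (fun x => x) false) x = false := by
        rw [← hbridge]; exact hcov
      simp only [pvAref, hcov, Bool.false_eq_true, if_false, List.filter_cons, hp, Bool.not_false,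
        if_pos]
      exact congrArg (x :: ·) (ih (pre ++ [x]) ht)

-- splitting pvAref along an append of its input
theorem pvAref_append (l1 : List String) : ∀ (l2 pre : List String),
    pvAref pre (l1 ++ l2) = pvAref pre l1 ++ pvAref (pre ++ l1) l2 := by
  induction l1 with
  | nil => intro l2 pre; simp [pvAref]
  | cons x t ih =>
    intro l2 pre
    simp only [List.cons_append, pvAref]
    cases hcov : pvCov pre x with
    | true => simp only [if_pos]; rw [ih]; simp
    | false => simp only [Bool.false_eq_true, if_false, List.cons_append]; rw [ih]; simp

-- B never keeps a position A drops: the filter is never longer than pvAref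
theorem pvLenB_le {items : List String} :
    ∀ (rem pre suf0 : List String),
      PySem.List.sorted items (fun x => x) false = pre ++ rem ++ suf0 →
      (rem.filter (fun y =>
        !(pvPredB (PySem.List.sorted items (fun x => x) false) y))).length ≤
        (pvAref pre rem).length := by
  intro rem
  induction rem with
  | nil => intro pre suf0 _; simp [pvAref]
  | cons x t ih =>
    intro pre suf0 hs
    have ht : PySem.List.sorted items (fun x => x) false = (pre ++ [x]) ++ t ++ suf0 := by
      rw [hs]; simp
    cases hcov : pvCov pre x with
    | true =>
      have hp : pvPredB (PySem.List.sorted items (fun x => x) false) x = true := by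
        unfold pvPredB
        rw [pvAnyAnc_iff]
        obtain ⟨a, p, b, hpre, hswx, _⟩ := (pvCov_iff pre x).mp hcov
        exact ⟨p, by rw [hs]; simp [hpre], hswx⟩
      simp only [pvAref, hcov, if_pos, List.filter_cons, hp, Bool.not_true, Bool.false_eq_true,
        if_false]
      exact ih (pre ++ [x]) suf0 ht
    | false =>
      simp only [pvAref, hcov, Bool.false_eq_true, if_false, List.filter_cons]
      cases hp : (!(pvPredB (PySem.List.sorted items (fun x => x) false) x)) with
      | true =>
        simp only [if_pos, List.length_cons]
        exact Nat.succ_le_succ (ih (pre ++ [x]) suf0 ht)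
      | false =>
        simp only [Bool.false_eq_true, if_false, List.length_cons]
        exact Nat.le_succ_of_le (ih (pre ++ [x]) suf0 ht)

-- ===== VERDICT =====
theorem merge_common_packages_spec : Claim_unchanged_merge_common_packages := by
  intro items _ hnd
  show merge_common_packages items = merge_common_packages_alt items
  rw [pvA_eq_Aref, pvB_eq_filter]
  exact pvAref_eq_filter hnd _ [] rfl

theorem merge_common_packages_changed : Claim_changed_merge_common_packages := by
  unfold Claim_changed_merge_common_packages
  have hsort : PySem.List.sorted ["a", "a!b", "a.b"] (fun x => x) false = ["a", "a!b", "a.b"] := by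
    apply PySem.List.sorted_eq_self_of_pairwise
    refine List.Pairwise.cons ?_ (List.Pairwise.cons ?_ (List.pairwise_singleton _ _))
    · intro y hy
      rcases List.mem_cons.mp hy with rfl | hy
      · exact le_of_lt (String.lt_iff_toList_lt.mpr (by decide))
      · rcases List.mem_singleton.mp hy with rfl
        exact le_of_lt (String.lt_iff_toList_lt.mpr (by decide))
    · intro y hy
      rcases List.mem_singleton.mp hy with rfl
      exact le_of_lt (String.lt_iff_toList_lt.mpr (by decide))
  refine ⟨by decide, by decide, ?_, ?_, by decide⟩
  · show merge_common_packages ["a", "a!b", "a.b"] = ["a", "a!b", "a.b"]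
    unfold merge_common_packages
    rw [hsort]
    decide
  · show merge_common_packages_alt ["a", "a!b", "a.b"] = ["a", "a!b"]
    unfold merge_common_packages_alt
    rw [hsort]
    decide

theorem merge_common_packages_tight : Claim_exact_merge_common_packages := by
  intro items _ hd
  obtain ⟨x, hxi, hanc, hnc⟩ := hd
  have hxs : x ∈ PySem.List.sorted items (fun x => x) false := by
    rw [(PySem.List.sorted_perm items (fun x => x) false).mem_iff]; exact hxi
  obtain ⟨pre, suf, hs⟩ := List.append_of_mem hxs
  -- A keeps this occurrence of x
  have hcovF : pvCov pre x = false := by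
    rw [Bool.eq_false_iff]
    intro hc
    obtain ⟨p, hpi, hswx, hcl⟩ := pvCov_clean hs hc
    exact hnc ⟨p, hpi, (pvSW_iff x p).mpr hswx, fun y hy h1 h2 =>
      (pvSW_iff y p).mpr (hcl y hy h1 h2)⟩
  -- B drops every occurrence of x
  have hpred : pvPredB (PySem.List.sorted items (fun x => x) false) x = true := by
    unfold pvPredB
    rw [pvAnyAnc_iff]
    obtain ⟨p, hpi, hswp⟩ := hanc
    exact ⟨p, by rw [(PySem.List.sorted_perm items (fun x => x) false).mem_iff]; exact hpi,
      (pvSW_iff x p).mp hswp⟩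
  -- length comparison
  have hpred2 : pvPredB (pre ++ x :: suf) x = true := by rw [← hs]; exact hpred
  have hA : merge_common_packages items =
      pvAref [] pre ++ (x :: pvAref (pre ++ [x]) suf) := by
    rw [pvA_eq_Aref, hs, pvAref_append pre (x :: suf) []]
    simp only [List.nil_append, pvAref, hcovF, Bool.false_eq_true, if_false]
  have hB : merge_common_packages_alt items =
      pre.filter (fun y => !(pvPredB (pre ++ x :: suf) y)) ++
        suf.filter (fun y => !(pvPredB (pre ++ x :: suf) y)) := by
    rw [pvB_eq_filter, hs, List.filter_append, List.filter_cons]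
    simp only [hpred2, Bool.not_true, Bool.false_eq_true, if_false]
  have h1 := pvLenB_le pre [] (x :: suf) (show PySem.List.sorted items (fun x => x) false = [] ++ pre ++ (x :: suf) by rw [hs]; simp)
  have h2 := pvLenB_le suf (pre ++ [x]) [] (show PySem.List.sorted items (fun x => x) false = (pre ++ [x]) ++ suf ++ [] by rw [hs]; simp)
  rw [hs] at h1 h2
  intro heq
  have hlen := congrArg List.length heq
  rw [hA, hB] at hlen
  simp only [List.length_append, List.length_cons] at hlen
  omega
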